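-- pv_equiv track=rewrite | github.com/Ghassan-elsman/Crow-Eye | correlation_engine/config/semantic_mapping.py | _feather_id_matches
-- ===== SOURCE A (Python) =====
-- def _feather_id_matches(condition_feather_id: str, record_feather_id: str) -> bool:
--     """Check if feather IDs match with common variations."""
--     if not condition_feather_id or not record_feather_id:
--         return not condition_feather_id  # If no condition feather_id, match any
--
--     # Normalize both IDs for comparison
--     cond_lower = condition_feather_id.lower().replace("_", "").replace("-", "")
--     rec_lower = record_feather_id.lower().replace("_", "").replace("-", "")
--
--     # Direct match
--     if cond_lower == rec_lower:
--         return True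
--
--     # Common mappings between rule feather IDs and actual feather IDs
--     feather_id_mappings = {
--         "securitylogs": ["systemlogs", "security", "eventlogs", "winevt"],
--         "systemlogs": ["securitylogs", "security", "eventlogs", "winevt"],
--         "prefetch": ["prefetch", "pf"],
--         "lnk": ["lnk", "shortcut", "link"],
--         "mft": ["mft", "mftusn", "ntfs"],
--         "usn": ["usn", "usnjournal", "mftusn"],
--         "shellbags": ["shellbags", "shell"],
--         "registry": ["registry", "reg"],
--         "amcache": ["amcache", "amcacheapp", "amcachefile", "inventoryapplication"],
--         "shimcache": ["shimcache", "appcompat"],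
--         "jumplist": ["jumplist", "jumplistauto", "jumplistcustom", "automaticjumplist", "customjumplist"],
--         "srum": ["srum", "srumapp", "srumusage"],
--         "browserhistory": ["browserhistory", "browser", "webhistory"],
--         "networkconnections": ["networkconnections", "network", "connections"],
--         "eventlogs": ["eventlogs", "winevt", "systemlogs", "securitylogs"],
--     }
--
--     # Check if condition feather ID maps to record feather ID
--     for key, variations in feather_id_mappings.items():
--         if cond_lower == key or cond_lower in variations:
--             if rec_lower == key or rec_lower in variations:
--                 return True
--
--     # Partial match (one contains the other)
--     if cond_lower in rec_lower or rec_lower in cond_lower: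
--         return True
--
--     return False
-- ===== SOURCE B (Python) =====
-- # Same matching function, but the mapping-table step uses a precomputed inverted
-- # index (token -> set of group ids) with a single set-intersection lookup instead
-- # of scanning every mapping entry with two membership tests per entry.
--
-- _FEATHER_ID_MAPPINGS = {
--     "securitylogs": ["systemlogs", "security", "eventlogs", "winevt"],
--     "systemlogs": ["securitylogs", "security", "eventlogs", "winevt"],
--     "prefetch": ["prefetch", "pf"],
--     "lnk": ["lnk", "shortcut", "link"],
--     "mft": ["mft", "mftusn", "ntfs"],
--     "usn": ["usn", "usnjournal", "mftusn"],
--     "shellbags": ["shellbags", "shell"],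
--     "registry": ["registry", "reg"],
--     "amcache": ["amcache", "amcacheapp", "amcachefile", "inventoryapplication"],
--     "shimcache": ["shimcache", "appcompat"],
--     "jumplist": ["jumplist", "jumplistauto", "jumplistcustom", "automaticjumplist", "customjumplist"],
--     "srum": ["srum", "srumapp", "srumusage"],
--     "browserhistory": ["browserhistory", "browser", "webhistory"],
--     "networkconnections": ["networkconnections", "network", "connections"],
--     "eventlogs": ["eventlogs", "winevt", "systemlogs", "securitylogs"],
-- }
--
-- # Inverted index: token -> set of group ids (a group = one mapping entry, key + variations).
-- _TOKEN_GROUPS = {}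
-- for _gid, (_key, _variations) in enumerate(_FEATHER_ID_MAPPINGS.items()):
--     for _token in [_key, *_variations]:
--         _TOKEN_GROUPS.setdefault(_token, set()).add(_gid)
--
--
-- def _feather_id_matches(condition_feather_id: str, record_feather_id: str) -> bool:
--     """Check if feather IDs match with common variations."""
--     if not condition_feather_id or not record_feather_id:
--         return not condition_feather_id  # If no condition feather_id, match any
--
--     cond_lower = condition_feather_id.lower().replace("_", "").replace("-", "")
--     rec_lower = record_feather_id.lower().replace("_", "").replace("-", "")
--
--     if cond_lower == rec_lower:
--         return True
--
--     # Mapping test: the two normalized ids share a mapping group iff the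
--     # intersection of their group-id sets is non-empty.
--     if _TOKEN_GROUPS.get(cond_lower, set()) & _TOKEN_GROUPS.get(rec_lower, set()):
--         return True
--
--     return cond_lower in rec_lower or rec_lower in cond_lower
-- ===== Notes on version B (the rewrite author's own statement) =====
-- stated objective: idiomatic
-- what changed: The per-entry scan over the mapping table (two membership tests per entry) is replaced by a precomputed inverted index token -> set of group ids, so the mapping test becomes two dict lookups and one set intersection; empty-guard, normalization and substring fallback are unchanged.
import Mathlib
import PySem

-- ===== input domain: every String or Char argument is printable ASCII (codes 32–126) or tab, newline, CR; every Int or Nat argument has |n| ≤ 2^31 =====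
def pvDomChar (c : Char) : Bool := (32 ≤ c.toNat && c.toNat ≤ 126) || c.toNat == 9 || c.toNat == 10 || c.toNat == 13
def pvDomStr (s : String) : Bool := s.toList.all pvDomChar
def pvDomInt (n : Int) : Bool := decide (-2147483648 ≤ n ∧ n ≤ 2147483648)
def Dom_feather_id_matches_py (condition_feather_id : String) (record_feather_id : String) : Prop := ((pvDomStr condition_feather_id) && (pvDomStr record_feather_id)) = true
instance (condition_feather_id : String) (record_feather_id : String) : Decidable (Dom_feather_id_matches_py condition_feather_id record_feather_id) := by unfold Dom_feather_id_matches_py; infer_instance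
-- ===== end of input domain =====

-- B replaces A's per-entry scan of the mapping table by a precomputed inverted index
-- (token -> set of group ids) queried with two lookups and a set intersection (idiomatic).


-- ===== PORT A =====
-- the module-level mapping table (dict literal with distinct keys, in insertion order),
-- shared by both ports as their common constant
def featherIdMappings : List (String × List String) :=
  [("securitylogs", ["systemlogs", "security", "eventlogs", "winevt"]),
   ("systemlogs", ["securitylogs", "security", "eventlogs", "winevt"]),
   ("prefetch", ["prefetch", "pf"]),
   ("lnk", ["lnk", "shortcut", "link"]),
   ("mft", ["mft", "mftusn", "ntfs"]),
   ("usn", ["usn", "usnjournal", "mftusn"]),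
   ("shellbags", ["shellbags", "shell"]),
   ("registry", ["registry", "reg"]),
   ("amcache", ["amcache", "amcacheapp", "amcachefile", "inventoryapplication"]),
   ("shimcache", ["shimcache", "appcompat"]),
   ("jumplist", ["jumplist", "jumplistauto", "jumplistcustom", "automaticjumplist", "customjumplist"]),
   ("srum", ["srum", "srumapp", "srumusage"]),
   ("browserhistory", ["browserhistory", "browser", "webhistory"]),
   ("networkconnections", ["networkconnections", "network", "connections"]),
   ("eventlogs", ["eventlogs", "winevt", "systemlogs", "securitylogs"])]

-- A's 'for key, variations in feather_id_mappings.items(): …' loop with early return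
def feather_loopA (cond rcd : String) : List (String × List String) → Bool
  | [] => false
  | (key, vars) :: rest =>
    if cond == key || vars.contains cond then
      if rcd == key || vars.contains rcd then true
      else feather_loopA cond rcd rest
    else feather_loopA cond rcd rest

def feather_id_matches_py (condition_feather_id : String) (record_feather_id : String) : Bool :=
  if condition_feather_id == "" || record_feather_id == "" then
    condition_feather_id == ""
  else
    let cond_lower := PySem.Str.replace (PySem.Str.replace (PySem.Str.lower condition_feather_id) "_" "") "-" ""
    let rec_lower := PySem.Str.replace (PySem.Str.replace (PySem.Str.lower record_feather_id) "_" "") "-" ""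
    if cond_lower == rec_lower then true
    else if feather_loopA cond_lower rec_lower featherIdMappings then true
    else if PySem.Str.isIn cond_lower rec_lower || PySem.Str.isIn rec_lower cond_lower then true
    else false

-- ===== PORT B =====
-- B's module-level inverted index: for gid, (key, variations) in enumerate(mappings.items()):
--   for token in [key, *variations]: token_groups.setdefault(token, set()).add(gid)
def featherTokenGroups : PySem.Dict String (PySem.Set Int) :=
  (PySem.List.enumerate featherIdMappings).foldl
    (fun d p => (p.2.1 :: p.2.2).foldl
      (fun d tok => d.modify tok [] (fun s => PySem.Set.add s p.1)) d)
    PySem.Dict.empty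

def feather_id_matches_py_alt (condition_feather_id : String) (record_feather_id : String) : Bool :=
  if condition_feather_id == "" || record_feather_id == "" then
    condition_feather_id == ""
  else
    let cond_lower := PySem.Str.replace (PySem.Str.replace (PySem.Str.lower condition_feather_id) "_" "") "-" ""
    let rec_lower := PySem.Str.replace (PySem.Str.replace (PySem.Str.lower record_feather_id) "_" "") "-" ""
    if cond_lower == rec_lower then true
    else if !(PySem.Set.inter (featherTokenGroups.getD cond_lower [])
                              (featherTokenGroups.getD rec_lower [])).isEmpty then true
    else PySem.Str.isIn cond_lower rec_lower || PySem.Str.isIn rec_lower cond_lower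

-- ===== PRECONDITION & SPEC =====
def Spec_feather_id_matches_py (condition_feather_id : String) (record_feather_id : String) (out : Bool) : Prop := out = feather_id_matches_py_alt condition_feather_id record_feather_id
instance (condition_feather_id : String) (record_feather_id : String) (out : Bool) : Decidable (Spec_feather_id_matches_py condition_feather_id record_feather_id out) := by unfold Spec_feather_id_matches_py; infer_instance

-- ===== CLAIM (what is proved, stated in full; the proofs are below) =====
def Claim_equal_feather_id_matches_py : Prop := ∀ (condition_feather_id : String) (record_feather_id : String), Dom_feather_id_matches_py condition_feather_id record_feather_id → Spec_feather_id_matches_py condition_feather_id record_feather_id (feather_id_matches_py condition_feather_id record_feather_id)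

-- ===== LEMMAS AND PROOFS =====

-- A's loop returns true iff some entry contains both normalized ids
theorem feather_loopA_eq_any (cond rcd : String) (L : List (String × List String)) :
    feather_loopA cond rcd L =
      L.any (fun kv => (cond == kv.1 || kv.2.contains cond) && (rcd == kv.1 || kv.2.contains rcd)) := by
  induction L with
  | nil => rfl
  | cons kv rest ih =>
    obtain ⟨key, vars⟩ := kv
    simp only [feather_loopA, List.any_cons, ← ih]
    cases h1 : (cond == key || vars.contains cond) <;>
      cases h2 : (rcd == key || vars.contains rcd) <;>
      simp_all

-- membership in the index after the inner fold over one group's token list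
theorem mem_inner_fold (g gid : Int) (tok : String) (ts : List String)
    (d : PySem.Dict String (PySem.Set Int)) :
    (g ∈ (ts.foldl (fun d tok => d.modify tok [] (fun s => PySem.Set.add s gid)) d).getD tok []) ↔
      g ∈ d.getD tok [] ∨ (tok ∈ ts ∧ g = gid) := by
  induction ts generalizing d with
  | nil => simp
  | cons t ts ih =>
    simp only [List.foldl_cons, ih, PySem.Dict.getD_modify, List.mem_cons]
    by_cases h : tok = t
    · subst h
      simp [PySem.Set.mem_add]
      tauto
    · simp [h]

-- membership in the index after the outer fold over the enumerated mapping list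
theorem mem_outer_fold (g : Int) (tok : String) (L : List (Int × (String × List String)))
    (d : PySem.Dict String (PySem.Set Int)) :
    (g ∈ (L.foldl (fun d p => (p.2.1 :: p.2.2).foldl
        (fun d t => d.modify t [] (fun s => PySem.Set.add s p.1)) d) d).getD tok []) ↔
      g ∈ d.getD tok [] ∨ ∃ p ∈ L, tok ∈ p.2.1 :: p.2.2 ∧ g = p.1 := by
  induction L generalizing d with
  | nil => simp
  | cons q L ih =>
    rw [List.foldl_cons, ih]
    rw [mem_inner_fold g q.1 tok (q.2.1 :: q.2.2) d]
    simp only [List.mem_cons]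
    constructor
    · rintro ((h | ⟨ht, hg⟩) | ⟨p, hp, ht, hg⟩)
      · exact Or.inl h
      · exact Or.inr ⟨q, Or.inl rfl, ht, hg⟩
      · exact Or.inr ⟨p, Or.inr hp, ht, hg⟩
    · rintro (h | ⟨p, hp | hp, ht, hg⟩)
      · exact Or.inl (Or.inl h)
      · subst hp; exact Or.inl (Or.inr ⟨ht, hg⟩)
      · exact Or.inr ⟨p, hp, ht, hg⟩

-- characterization of the inverted index
theorem mem_featherTokenGroups (g : Int) (tok : String) :
    g ∈ featherTokenGroups.getD tok [] ↔
      ∃ p ∈ PySem.List.enumerate featherIdMappings, tok ∈ p.2.1 :: p.2.2 ∧ g = p.1 := by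
  rw [featherTokenGroups, mem_outer_fold]
  simp

-- B's intersection test equals A's loop on the mapping table
theorem mid_eq (cond rcd : String) :
    (!(PySem.Set.inter (featherTokenGroups.getD cond [])
                       (featherTokenGroups.getD rcd [])).isEmpty) =
      feather_loopA cond rcd featherIdMappings := by
  rw [feather_loopA_eq_any, Bool.eq_iff_iff, List.any_eq_true]
  simp only [Bool.not_eq_true', List.isEmpty_eq_false_iff_exists_mem]
  constructor
  · rintro ⟨g, hg⟩
    rw [PySem.Set.mem_inter] at hg
    obtain ⟨hc, hr⟩ := hg
    rw [mem_featherTokenGroups] at hc hr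
    obtain ⟨p, hp, hcp, rfl⟩ := hc
    obtain ⟨q, hq, hrq, hpq⟩ := hr
    rw [PySem.List.mem_enumerate_iff] at hp hq
    obtain ⟨k, hk, rfl⟩ := hp
    obtain ⟨k', hk', rfl⟩ := hq
    have hkk : k = k' := by simpa using hpq
    subst hkk
    refine ⟨featherIdMappings[k], List.getElem_mem hk, ?_⟩
    simp only [List.mem_cons] at hcp hrq
    simp only [Bool.and_eq_true, Bool.or_eq_true, beq_iff_eq, List.contains_eq_mem,
      decide_eq_true_eq]
    exact ⟨hcp, hrq⟩
  · rintro ⟨kv, hkv, ht⟩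
    simp only [Bool.and_eq_true, Bool.or_eq_true, beq_iff_eq, List.contains_eq_mem,
      decide_eq_true_eq, ← List.mem_cons] at ht
    obtain ⟨k, hk, rfl⟩ := List.getElem_of_mem hkv
    refine ⟨(k : Int), ?_⟩
    rw [PySem.Set.mem_inter, mem_featherTokenGroups, mem_featherTokenGroups]
    exact ⟨⟨((0 : Int) + k, featherIdMappings[k]),
            Iff.mpr (PySem.List.mem_enumerate_iff featherIdMappings 0 _) ⟨k, hk, rfl⟩, ht.1, by simp⟩,
          ⟨((0 : Int) + k, featherIdMappings[k]),
            Iff.mpr (PySem.List.mem_enumerate_iff featherIdMappings 0 _) ⟨k, hk, rfl⟩, ht.2, by simp⟩⟩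

-- ===== VERDICT (by name: the statement is the Claim_ definition above) =====
theorem feather_id_matches_py_spec : Claim_equal_feather_id_matches_py := by
  intro c r _
  show feather_id_matches_py c r = feather_id_matches_py_alt c r
  simp only [feather_id_matches_py, feather_id_matches_py_alt, mid_eq]
  split_ifs <;> simp_all
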